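-- pv_equiv track=rewrite | github.com/Parokor/control-agency | convert_dockerfile_to_containerfile.py | add_podman_specific_instructions
-- ===== SOURCE A (Python) =====
-- def add_podman_specific_instructions(instructions):
--     """Añade instrucciones específicas de Podman."""
--     result = []
--
--     # Añadir comentario al principio
--     result.append("# Containerfile optimizado para Podman")
--     result.append("# Convertido automáticamente desde Dockerfile")
--     result.append("")
--
--     # Buscar la instrucción FROM
--     from_index = -1
--     for i, instruction in enumerate(instructions):
--         if instruction.upper().startswith('FROM'):
--             from_index = i
--             break
--
--     # Añadir instrucciones antes de FROM
--     if from_index > 0: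
--         result.extend(instructions[:from_index])
--
--     # Añadir FROM
--     if from_index >= 0:
--         result.append(instructions[from_index])
--
--     # Añadir LABEL para Podman
--     result.append("LABEL io.podman.annotations.init=\"true\"")
--
--     # Añadir el resto de instrucciones
--     if from_index >= 0:
--         result.extend(instructions[from_index + 1:])
--     else:
--         result.extend(instructions)
--
--     return result
-- ===== SOURCE B (Python) =====
-- LABEL = 'LABEL io.podman.annotations.init="true"'
--
--
-- def add_podman_specific_instructions(instructions):
--     """Añade instrucciones específicas de Podman (single in-line pass)."""
--     result = [
--         "# Containerfile optimizado para Podman",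
--         "# Convertido automáticamente desde Dockerfile",
--         "",
--     ]
--     inserted = False
--     for instruction in instructions:
--         result.append(instruction)
--         if not inserted and instruction.upper().startswith('FROM'):
--             result.append(LABEL)
--             inserted = True
--     if not inserted:
--         result.insert(3, LABEL)
--     return result
-- ===== Notes on version B (the rewrite author's own statement) =====
-- stated objective: simpler
-- what changed: Replaces the find-index-then-slice-concatenation shape with a single pass over the instructions carrying an 'inserted' flag, inserting the LABEL right after the first FROM (or at index 3 after the loop if no FROM exists).
import Mathlib
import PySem

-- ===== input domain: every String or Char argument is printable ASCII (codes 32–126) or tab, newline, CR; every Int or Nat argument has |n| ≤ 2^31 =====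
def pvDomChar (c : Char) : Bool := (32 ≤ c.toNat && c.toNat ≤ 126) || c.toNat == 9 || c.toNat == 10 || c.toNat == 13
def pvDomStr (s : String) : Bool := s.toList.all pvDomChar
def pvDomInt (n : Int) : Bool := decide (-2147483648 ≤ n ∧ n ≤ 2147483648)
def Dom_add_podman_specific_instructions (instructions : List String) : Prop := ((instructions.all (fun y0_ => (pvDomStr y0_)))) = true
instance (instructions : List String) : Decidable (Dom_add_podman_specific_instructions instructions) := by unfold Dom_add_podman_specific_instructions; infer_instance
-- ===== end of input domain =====

-- B replaces A's find-index-then-slice-concatenation with a single pass carrying an 'inserted' flag (simpler decomposition, same cost).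

-- ===== PORT A =====
def pvHeader : List String :=
  ["# Containerfile optimizado para Podman", "# Convertido automáticamente desde Dockerfile", ""]

def pvLabel : String := "LABEL io.podman.annotations.init=\"true\""

-- the 'for i, instruction in enumerate(instructions): if …: from_index = i; break' loop
def pvFindFrom : List String → Int → Int
  | [], _ => -1
  | x :: xs, i =>
      if PySem.Str.startswith (PySem.Str.upper x) "FROM" then i else pvFindFrom xs (i + 1)

def add_podman_specific_instructions (instructions : List String) : List String :=
  let result := pvHeader
  let fromIndex := pvFindFrom instructions 0
  let result := if fromIndex > 0 then result ++ PySem.List.slice instructions none (some fromIndex) else result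
  -- instructions[from_index]: ported with pyGetD; the index is in range whenever this branch runs
  let result := if fromIndex ≥ 0 then result ++ [PySem.List.pyGetD instructions fromIndex ""] else result
  let result := result ++ [pvLabel]
  if fromIndex ≥ 0 then result ++ PySem.List.slice instructions (some (fromIndex + 1)) none
  else result ++ instructions

-- ===== PORT B =====
def pvStep (st : List String × Bool) (instruction : String) : List String × Bool :=
  let r := st.1 ++ [instruction]
  if !st.2 && PySem.Str.startswith (PySem.Str.upper instruction) "FROM" then (r ++ [pvLabel], true)
  else (r, st.2)

def add_podman_specific_instructions_alt (instructions : List String) : List String :=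
  let st := instructions.foldl pvStep (pvHeader, false)
  if st.2 then st.1 else PySem.List.insert st.1 3 pvLabel

-- ===== PRECONDITION & SPEC =====
def Spec_add_podman_specific_instructions (instructions : List String) (out : List String) : Prop := out = add_podman_specific_instructions_alt instructions
instance (instructions : List String) (out : List String) : Decidable (Spec_add_podman_specific_instructions instructions out) := by unfold Spec_add_podman_specific_instructions; infer_instance

-- ===== CLAIM (what is proved, stated in full; the proofs are below) =====
def Claim_equal_add_podman_specific_instructions : Prop := ∀ (instructions : List String), Dom_add_podman_specific_instructions instructions → Spec_add_podman_specific_instructions instructions (add_podman_specific_instructions instructions)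

-- ===== LEMMAS AND PROOFS =====

-- predicate both programs test
def pvIsFrom (s : String) : Bool := PySem.Str.startswith (PySem.Str.upper s) "FROM"

-- once inserted, the B loop only appends
theorem pvStep_true (xs : List String) (acc : List String) :
    xs.foldl pvStep (acc, true) = (acc ++ xs, true) := by
  induction xs generalizing acc with
  | nil => simp
  | cons x xs ih => simp [pvStep, ih]

-- the B loop before insertion, characterised by the first FROM position
theorem pvStep_false (xs : List String) (acc : List String) :
    xs.foldl pvStep (acc, false) =
      if h : xs.any pvIsFrom then
        let n := xs.findIdx (fun s => pvIsFrom s)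
        (acc ++ xs.take n ++ [xs[n]'(List.findIdx_lt_length.mpr (by simpa [List.any_eq_true] using h))]
           ++ [pvLabel] ++ xs.drop (n + 1), true)
      else (acc ++ xs, false) := by
  induction xs generalizing acc with
  | nil => simp
  | cons x xs ih =>
    by_cases hx : pvIsFrom x
    · simp [pvIsFrom] at hx
      simp [pvStep, hx, List.findIdx_cons, pvIsFrom, pvStep_true]
    · have hxf : PySem.Chars.startswith (PySem.Chars.upper x.toList)
          ['F', 'R', 'O', 'M'] = false := by
        simpa [pvIsFrom] using hx
      rw [List.foldl_cons, show pvStep (acc, false) x = (acc ++ [x], false) by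
        simp [pvStep, hxf], ih]
      by_cases hany : xs.any pvIsFrom
      · have hany' : (x :: xs).any pvIsFrom = true := by simp [List.any_cons, hany]
        simp only [hany, hany', dif_pos]
        simp [List.findIdx_cons, hxf, pvIsFrom, List.append_assoc]
      · have hany' : ((x :: xs).any pvIsFrom) = false := by
          simp [List.any_cons, pvIsFrom, hxf]
          simpa [pvIsFrom] using hany
        simp [hany, hany', List.append_assoc]

-- pvFindFrom returns offset + first index, or -1 when no FROM occurs
theorem pvFindFrom_eq (xs : List String) (k : Int) :
    pvFindFrom xs k = if xs.any pvIsFrom then k + xs.findIdx (fun s => pvIsFrom s) else -1 := by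
  induction xs generalizing k with
  | nil => simp [pvFindFrom]
  | cons x xs ih =>
    by_cases hx : pvIsFrom x
    · simp [pvIsFrom] at hx
      simp [pvFindFrom, hx, List.findIdx_cons, pvIsFrom]
    · have hxf : PySem.Chars.startswith (PySem.Chars.upper x.toList)
          ['F', 'R', 'O', 'M'] = false := by
        simpa [pvIsFrom] using hx
      rw [show pvFindFrom (x :: xs) k = pvFindFrom xs (k + 1) by
        simp [pvFindFrom, hxf], ih]
      by_cases hany : xs.any pvIsFrom
      · simp [hany, List.any_cons, hxf, List.findIdx_cons, pvIsFrom]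
        ring
      · simp [hany, List.any_cons, hxf, pvIsFrom]

theorem add_podman_main (instructions : List String) :
    add_podman_specific_instructions instructions = add_podman_specific_instructions_alt instructions := by
  unfold add_podman_specific_instructions add_podman_specific_instructions_alt
  rw [pvFindFrom_eq, pvStep_false]
  by_cases hany : instructions.any pvIsFrom
  · have hlt : instructions.findIdx (fun s => pvIsFrom s) < instructions.length :=
      List.findIdx_lt_length.mpr (by simpa [List.any_eq_true] using hany)
    simp only [hany, dif_pos, if_pos, zero_add]
    have hge : ((instructions.findIdx (fun s => pvIsFrom s) : Int) ≥ 0) := by positivity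
    have hslice1 : PySem.List.slice instructions none (some (instructions.findIdx (fun s => pvIsFrom s) : Int))
        = instructions.take (instructions.findIdx (fun s => pvIsFrom s)) :=
      PySem.List.slice_to_natCast instructions _
    have hslice2 : PySem.List.slice instructions (some ((instructions.findIdx (fun s => pvIsFrom s) : Int) + 1)) none
        = instructions.drop (instructions.findIdx (fun s => pvIsFrom s) + 1) := by
      have h1 : ((instructions.findIdx (fun s => pvIsFrom s) : Int) + 1)
          = ((instructions.findIdx (fun s => pvIsFrom s) + 1 : Nat) : Int) := by push_cast; ring
      rw [h1]
      exact PySem.List.slice_from_natCast instructions _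
    have hget : PySem.List.pyGetD instructions (instructions.findIdx (fun s => pvIsFrom s) : Int) ""
        = instructions[instructions.findIdx (fun s => pvIsFrom s)]'hlt := by
      rw [PySem.List.pyGetD_natCast]
      exact List.getD_eq_getElem _ _ hlt
    have hif : (if ((instructions.findIdx (fun s => pvIsFrom s) : Int) > 0)
          then pvHeader ++ PySem.List.slice instructions none (some (instructions.findIdx (fun s => pvIsFrom s) : Int))
          else pvHeader)
        = pvHeader ++ instructions.take (instructions.findIdx (fun s => pvIsFrom s)) := by
      rcases Nat.eq_zero_or_pos (instructions.findIdx (fun s => pvIsFrom s)) with h | h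
      · rw [if_neg (by simp [h]), h]
        simp
      · rw [if_pos (by exact_mod_cast h), hslice1]
    rw [if_pos hge, if_pos hge, hif, hslice2, hget]
  · simp only [hany, dif_neg, Bool.false_eq_true, not_false_iff, if_neg]
    have h1 : ¬ ((-1 : Int) > 0) := by norm_num
    have h2 : ¬ ((-1 : Int) ≥ 0) := by norm_num
    rw [if_neg h1, if_neg h2, if_neg h2,
        show ((3 : Int) = ((3 : Nat) : Int)) from rfl,
        PySem.List.insert_natCast (pvHeader ++ instructions) 3 pvLabel (by simp [pvHeader])]
    simp [pvHeader]

-- ===== VERDICT (by name: the statement is the Claim_ definition above) =====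
theorem add_podman_specific_instructions_spec : Claim_equal_add_podman_specific_instructions := by
  intro instructions _
  unfold Spec_add_podman_specific_instructions
  exact add_podman_main instructions
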